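-- pv_equiv track=rewrite | github.com/woori9/algo_rhythm | 연습문제/디펜스게임/s1.py | solution
-- ===== SOURCE A (Python) =====
-- import heapq
--
-- def solution(n, k, enemy):
--     if k >= len(enemy):
--         return len(enemy)
--
--     result = len(enemy)
--     heap = []
--     current_n = n
--
--     for i in range(len(enemy)):
--         if current_n >= enemy[i]:
--             heapq.heappush(heap, (-enemy[i]))
--             current_n -= enemy[i]
--             continue
--
--         if k == 0:
--             result = i
--             break
--
--         heapq.heappush(heap, (-enemy[i]))
--         current_n -= enemy[i]
--         largest_enemy = heapq.heappop(heap)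
--         current_n += (largest_enemy * -1)
--         k -= 1
--
--     return result
-- ===== SOURCE B (Python) =====
-- import heapq
--
-- def solution(n, k, enemy):
--     if k >= len(enemy):
--         return len(enemy)
--     cost = 0
--     skipped = []
--     for i in range(len(enemy)):
--         heapq.heappush(skipped, enemy[i])
--         if len(skipped) > k:
--             cost += heapq.heappop(skipped)
--         if cost > n:
--             return i
--     return len(enemy)
-- ===== Notes on version B (the rewrite author's own statement) =====
-- stated objective: alternative
-- what changed: Replaces A's budget-simulation greedy (max-heap of fought enemies, refund the largest when the budget runs out, explicit skip counter) by a running-cost pass that keeps a min-heap of the k largest enemies skipped so far and fails as soon as the cost of fighting the rest exceeds n.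
-- outside the precondition, e.g. on solution(-3, 1, [5, -4, -1, 6]): A returns 3, B returns 0; on solution(-1, 1, [0, 0]): A returns 1, B returns 0; on solution(4, -2, [3, 3, 3]): A returns 3, B returns 1
import Mathlib
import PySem

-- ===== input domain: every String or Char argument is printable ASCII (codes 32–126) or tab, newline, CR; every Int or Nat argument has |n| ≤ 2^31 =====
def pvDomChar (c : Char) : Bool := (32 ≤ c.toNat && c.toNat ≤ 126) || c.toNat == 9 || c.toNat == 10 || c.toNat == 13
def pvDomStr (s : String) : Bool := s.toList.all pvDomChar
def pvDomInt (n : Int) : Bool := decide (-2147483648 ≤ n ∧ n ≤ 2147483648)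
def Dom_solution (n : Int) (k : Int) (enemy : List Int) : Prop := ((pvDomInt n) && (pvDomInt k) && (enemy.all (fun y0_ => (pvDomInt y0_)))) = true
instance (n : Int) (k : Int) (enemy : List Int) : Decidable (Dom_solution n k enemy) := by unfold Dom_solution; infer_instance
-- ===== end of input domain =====

-- B replaces A's budget simulation (max-heap of fought enemies, refund the largest when the
-- budget runs out) by a running-cost pass with a min-heap of the at-most-k skipped enemies;
-- an alternative of the same cost, not claimed faster.

-- ===== PORT A =====
-- heapq helper shared by both ports: for an int heap only the popped value (the minimum)
-- and the remaining multiset are observable, so the heap is kept as a plain list;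
-- heapPop returns the minimum and the rest (exact for heapq on ints).
def heapPush (h : List Int) (x : Int) : List Int := x :: h

def heapPop : List Int → Int × List Int
  | [] => (0, [])
  | [x] => (x, [])
  | x :: y :: t =>
    let p := heapPop (y :: t)
    if x ≤ p.1 then (x, y :: t) else (p.1, x :: p.2)

-- A's for-loop over range(len(enemy)) with break: result is returned as `res`, break returns i
def goA : List Int → Int → List Int → Int → Int → Int → Int
  | [], _, _, _, _, res => res
  | e :: rest, i, heap, cur, k, res =>
    if e ≤ cur then
      goA rest (i + 1) (heapPush heap (-e)) (cur - e) k res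
    else if k = 0 then i
    else
      let h1 := heapPush heap (-e)
      let p := heapPop h1
      goA rest (i + 1) p.2 (cur - e + p.1 * (-1)) (k - 1) res

def solution (n : Int) (k : Int) (enemy : List Int) : Int :=
  if (enemy.length : Int) ≤ k then (enemy.length : Int)
  else goA enemy 0 [] n k (enemy.length : Int)

-- ===== PORT B =====
-- B's loop: push enemy[i] into the min-heap `sk`; if it holds more than k, evict the
-- minimum into the running cost; fail at i as soon as cost > n.
def goB (n kk : Int) : List Int → Int → List Int → Int → Int → Int
  | [], _, _, _, res => res
  | e :: rest, i, sk, cost, res =>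
    let sk1 := heapPush sk e
    let s := if kk < (sk1.length : Int) then
        let p := heapPop sk1
        (cost + p.1, p.2)
      else (cost, sk1)
    if n < s.1 then i else goB n kk rest (i + 1) s.2 s.1 res

def solution_alt (n : Int) (k : Int) (enemy : List Int) : Int :=
  if (enemy.length : Int) ≤ k then (enemy.length : Int)
  else goB n k enemy 0 [] 0 (enemy.length : Int)

-- ===== PRECONDITION & SPEC =====
-- Pre_ admits the trivial-guard region k ≥ len(enemy) (both return len(enemy) for any signs)
-- and otherwise restricts to the problem's natural domain (a round budget, a skip count and
-- enemy counts are all nonnegative); for negative n, k or enemy entries that reach the loop,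
-- the two greedy formulations legitimately diverge and neither value is specified.
def Pre_solution (n : Int) (k : Int) (enemy : List Int) : Prop :=
  (enemy.length : Int) ≤ k ∨ (0 ≤ n ∧ 0 ≤ k ∧ ∀ e ∈ enemy, 0 ≤ e)
instance (n : Int) (k : Int) (enemy : List Int) : Decidable (Pre_solution n k enemy) := by
  unfold Pre_solution; infer_instance

def pvWitness_solution : Int × Int × List Int := (7, 1, [3, 5, 2])

def Spec_solution (n : Int) (k : Int) (enemy : List Int) (out : Int) : Prop := out = solution_alt n k enemy
instance (n : Int) (k : Int) (enemy : List Int) (out : Int) : Decidable (Spec_solution n k enemy out) := by unfold Spec_solution; infer_instance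

-- ===== CLAIM (what is proved, stated in full; the proofs are below) =====
def Claim_equal_solution : Prop := ∀ (n : Int) (k : Int) (enemy : List Int), Dom_solution n k enemy → Pre_solution n k enemy → Spec_solution n k enemy (solution n k enemy)

-- ===== LEMMAS AND PROOFS =====

-- heapPop on a nonempty list returns its minimum together with the rest, up to permutation.
theorem heapPop_spec : ∀ (l : List Int), l ≠ [] →
    l.Perm ((heapPop l).1 :: (heapPop l).2) ∧ ∀ y ∈ l, (heapPop l).1 ≤ y := by
  intro l
  induction l with
  | nil => simp
  | cons x xs ih =>
    cases xs with
    | nil => intro _; simp [heapPop]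
    | cons y t =>
      intro _
      obtain ⟨hp, hm⟩ := ih (by simp)
      by_cases hx : x ≤ (heapPop (y :: t)).1
      · simp only [heapPop, hx, if_true]
        refine ⟨List.Perm.refl _, ?_⟩
        intro z hz
        rcases List.mem_cons.mp hz with rfl | hz
        · exact le_refl _
        · exact le_trans hx (hm z hz)
      · simp only [heapPop, hx, if_false]
        constructor
        · exact (List.Perm.cons x hp).trans (List.Perm.swap _ _ _)
        · intro z hz
          rcases List.mem_cons.mp hz with rfl | hz
          · exact (not_le.mp hx).le
          · exact hm z hz

-- pairing: a multiset dominated elementwise by a larger multiset of nonnegatives has smaller sum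
theorem sum_le_sum_pair (A : Multiset Int) : ∀ (B : Multiset Int),
    Multiset.card A ≤ Multiset.card B → (∀ a ∈ A, ∀ b ∈ B, a ≤ b) →
    (∀ b ∈ B, (0:Int) ≤ b) → A.sum ≤ B.sum := by
  induction A using Multiset.induction with
  | empty => intro B _ _ hB; simpa using Multiset.sum_nonneg hB
  | cons a A ih =>
    intro B hc hle hB
    have hBpos : 0 < Multiset.card B := by
      have := hc; simp only [Multiset.card_cons] at this; omega
    obtain ⟨b, hb⟩ := Multiset.card_pos_iff_exists_mem.mp hBpos
    obtain ⟨B', rfl⟩ := Multiset.exists_cons_of_mem hb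
    simp only [Multiset.sum_cons]
    have h1 : a ≤ b := hle a (Multiset.mem_cons_self a A) b (Multiset.mem_cons_self b B')
    have h2 : A.sum ≤ B'.sum := by
      refine ih B' ?_ ?_ ?_
      · have := hc; simp only [Multiset.card_cons] at this; omega
      · intro a' ha' b' hb'
        exact hle a' (Multiset.mem_cons_of_mem ha') b' (Multiset.mem_cons_of_mem hb')
      · intro b' hb'; exact hB b' (Multiset.mem_cons_of_mem hb')
    omega

-- a dominant sub-multiset U of M majorizes every sub-multiset T of at most its size
theorem dominant_ge (M T U : Multiset Int) (hT : T ≤ M) (hU : U ≤ M)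
    (hM : ∀ x ∈ M, (0:Int) ≤ x)
    (hdom : ∀ x ∈ M - U, ∀ u ∈ U, x ≤ u)
    (hc : Multiset.card T ≤ Multiset.card U) : T.sum ≤ U.sum := by
  have hTdec : T - U + T ∩ U = T := Multiset.sub_add_inter T U
  have hUdec : U - T + U ∩ T = U := Multiset.sub_add_inter U T
  have hsumT : T.sum = (T - U).sum + (T ∩ U).sum := by
    conv_lhs => rw [← hTdec]
    rw [Multiset.sum_add]
  have hsumU : U.sum = (U - T).sum + (U ∩ T).sum := by
    conv_lhs => rw [← hUdec]
    rw [Multiset.sum_add]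
  have hcardT : Multiset.card T = Multiset.card (T - U) + Multiset.card (T ∩ U) := by
    conv_lhs => rw [← hTdec]; rw [Multiset.card_add]
  have hcardU : Multiset.card U = Multiset.card (U - T) + Multiset.card (U ∩ T) := by
    conv_lhs => rw [← hUdec]; rw [Multiset.card_add]
  have hintc : T ∩ U = U ∩ T := Multiset.inter_comm T U
  have hcc : Multiset.card (T - U) ≤ Multiset.card (U - T) := by
    rw [hintc] at hcardT; omega
  have hmain : (T - U).sum ≤ (U - T).sum := by
    refine sum_le_sum_pair (T - U) (U - T) hcc ?_ ?_
    · intro a ha b hb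
      have haM : a ∈ M - U := by
        have : T - U ≤ M - U := tsub_le_tsub_right hT U
        exact Multiset.mem_of_le this ha
      have hbU : b ∈ U := Multiset.mem_of_le (Multiset.sub_le_self U T) hb
      exact hdom a haM b hbU
    · intro b hb
      exact hM b (Multiset.mem_of_le (le_trans (Multiset.sub_le_self U T) hU) hb)
  rw [hsumT, hsumU, hintc]
  omega

-- pushing e and evicting the minimum preserves "sk dominates the rest of P"
theorem evict_dominance (P : Multiset Int) (sk : List Int) (e : Int)
    (hsk : (sk : Multiset Int) ≤ P)
    (hdom : ∀ x ∈ P - (sk : Multiset Int), ∀ u ∈ (sk : Multiset Int), x ≤ u)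
    (hperm : (e :: sk).Perm ((heapPop (e :: sk)).1 :: (heapPop (e :: sk)).2))
    (hmin : ∀ y ∈ e :: sk, (heapPop (e :: sk)).1 ≤ y) :
    ((heapPop (e :: sk)).2 : Multiset Int) ≤ P + {e} ∧
    (∀ x ∈ (P + {e}) - ((heapPop (e :: sk)).2 : Multiset Int),
       ∀ u ∈ ((heapPop (e :: sk)).2 : Multiset Int), x ≤ u) := by
  set m := (heapPop (e :: sk)).1 with hm_def
  set r := (heapPop (e :: sk)).2 with hr_def
  have hM : (e ::ₘ (sk : Multiset Int)) = m ::ₘ (r : Multiset Int) := by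
    have h := Multiset.coe_eq_coe.mpr hperm
    simpa using h
  constructor
  · have h1 : (r : Multiset Int) ≤ e ::ₘ (sk : Multiset Int) := by
      rw [hM]; exact Multiset.le_cons_self _ _
    calc (r : Multiset Int) ≤ e ::ₘ (sk : Multiset Int) := h1
      _ ≤ e ::ₘ P := Multiset.cons_le_cons e hsk
      _ = P + {e} := by rw [add_comm, Multiset.singleton_add]
  · have hP0 : P - (sk : Multiset Int) + (sk : Multiset Int) = P := tsub_add_cancel_of_le hsk
    have hsplit : P + {e} = ((P - (sk : Multiset Int)) + {m}) + (r : Multiset Int) := by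
      calc P + {e} = (P - (sk : Multiset Int) + (sk : Multiset Int)) + {e} := by rw [hP0]
        _ = (P - (sk : Multiset Int)) + (e ::ₘ (sk : Multiset Int)) := by
              rw [add_assoc, add_comm ((sk : Multiset Int)) ({e} : Multiset Int),
                Multiset.singleton_add]
        _ = (P - (sk : Multiset Int)) + (m ::ₘ (r : Multiset Int)) := by rw [hM]
        _ = ((P - (sk : Multiset Int)) + {m}) + (r : Multiset Int) := by
              rw [← Multiset.singleton_add, ← add_assoc]
    have hdecomp : (P + {e}) - (r : Multiset Int) = (P - (sk : Multiset Int)) + {m} := by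
      rw [hsplit, add_tsub_cancel_right]
    intro x hx u hu
    rw [hdecomp] at hx
    have hu' : u ∈ e ::ₘ (sk : Multiset Int) := by rw [hM]; exact Multiset.mem_cons_of_mem hu
    have humin : m ≤ u := by
      refine hmin u ?_
      have : u ∈ ((e :: sk : List Int) : Multiset Int) := by simpa using hu'
      simpa using this
    rcases Multiset.mem_add.mp hx with hx1 | hx2
    · by_cases hmsk : m ∈ (sk : Multiset Int)
      · exact le_trans (hdom x hx1 m hmsk) humin
      · have hme : m = e := by
          have hmm : m ∈ e ::ₘ (sk : Multiset Int) := by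
            rw [hM]; exact Multiset.mem_cons_self _ _
          rcases Multiset.mem_cons.mp hmm with h | h
          · exact h
          · exact absurd h hmsk
        have hrsk : (r : Multiset Int) = (sk : Multiset Int) := by
          rw [hme] at hM
          exact ((Multiset.cons_inj_right e).mp hM.symm)
        have husk2 : u ∈ (sk : Multiset Int) := by rw [← hrsk]; exact hu
        exact hdom x hx1 u husk2
    · have hxm : x = m := by simpa using hx2
      rw [hxm]; exact humin

-- every nonempty multiset of ints has a minimum
theorem multiset_exists_min (S : Multiset Int) (h : S ≠ 0) :
    ∃ m ∈ S, ∀ s ∈ S, m ≤ s := by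
  induction S using Multiset.induction with
  | empty => exact absurd rfl h
  | cons a S ih =>
    by_cases hS : S = 0
    · subst hS
      exact ⟨a, Multiset.mem_cons_self a 0, by intro s hs; simp at hs; omega⟩
    · obtain ⟨m, hm, hmin⟩ := ih hS
      refine ⟨min a m, ?_, ?_⟩
      · rcases le_total a m with h' | h'
        · simp only [min_eq_left h']; exact Multiset.mem_cons_self a S
        · simp only [min_eq_right h']; exact Multiset.mem_cons_of_mem hm
      · intro s hs
        rcases Multiset.mem_cons.mp hs with rfl | hs
        · exact min_le_left _ _
        · exact le_trans (min_le_right _ _) (hmin s hs)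

theorem sum_map_neg (l : List Int) : (l.map (fun x => -x)).sum = -l.sum := by
  induction l with
  | nil => simp
  | cons a t ih => simp only [List.map_cons, List.sum_cons, ih]; ring

-- the main bisimulation between A's state and B's state
theorem main_bisim (n k : Int) :
    ∀ (rest : List Int) (i res : Int) (hA : List Int) (cur kk : Int)
      (sk : List Int) (cost : Int) (SkA P : Multiset Int),
      P = ((hA.map (fun x => -x) : List Int) : Multiset Int) + SkA →
      (∀ e ∈ rest, 0 ≤ e) →
      (∀ x ∈ hA, x ≤ 0) →
      (∀ s ∈ SkA, (0:Int) ≤ s) →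
      cur = n + hA.sum →
      0 ≤ cur →
      kk = k - Multiset.card SkA →
      0 ≤ kk →
      (∀ x ∈ hA, ∀ s ∈ SkA, -x ≤ s) →
      (∀ s ∈ SkA, cur < s) →
      (sk : Multiset Int) ≤ P →
      cost = P.sum - sk.sum →
      (sk.length : Int) = min ((Multiset.card P : Int)) k →
      (∀ x ∈ P - (sk : Multiset Int), ∀ u ∈ (sk : Multiset Int), x ≤ u) →
      cost ≤ n →
      goA rest i hA cur kk res = goB n k rest i sk cost res := by
  intro rest
  induction rest with
  | nil =>
    intro i res hA cur kk sk cost SkA P _ _ _ _ _ _ _ _ _ _ _ _ _ _ _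
    simp [goA, goB]
  | cons e rest ih =>
    intro i res hA cur kk sk cost SkA P hP hrest hhA hSkA hcur hcur0 hkk hkk0 hdomA
      hcurS hskle hcost hlen hdomB hcostn
    have he : (0:Int) ≤ e := hrest e (by simp)
    have hrest' : ∀ x ∈ rest, (0:Int) ≤ x := fun x hx => hrest x (List.mem_cons_of_mem _ hx)
    have hFsum : ((hA.map (fun x => -x) : List Int) : Multiset Int).sum = -hA.sum := by
      rw [Multiset.sum_coe]; exact sum_map_neg hA
    have hPsum : P.sum = -hA.sum + SkA.sum := by rw [hP, Multiset.sum_add, hFsum]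
    have hPnn : ∀ x ∈ P, (0:Int) ≤ x := by
      intro x hx
      rw [hP] at hx
      rcases Multiset.mem_add.mp hx with hx | hx
      · rw [Multiset.mem_coe, List.mem_map] at hx
        obtain ⟨y, hy, rfl⟩ := hx
        have := hhA y hy; omega
      · exact hSkA x hx
    have hPenn : ∀ x ∈ P + {e}, (0:Int) ≤ x := by
      intro x hx
      rcases Multiset.mem_add.mp hx with hx | hx
      · exact hPnn x hx
      · rw [Multiset.mem_singleton] at hx; omega
    have hcardPe : (Multiset.card (P + {e}) : Int) = (Multiset.card P : Int) + 1 := by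
      rw [Multiset.card_add, Multiset.card_singleton]; push_cast; ring
    have hSkAleP : SkA ≤ P := by rw [hP]; exact Multiset.le_add_left _ _
    have hsubF : P - SkA = ((hA.map (fun x => -x) : List Int) : Multiset Int) := by
      rw [hP, add_tsub_cancel_right]
    have hdomSkA : ∀ x ∈ P - SkA, ∀ s ∈ SkA, x ≤ s := by
      intro x hx s hs
      rw [hsubF, Multiset.mem_coe, List.mem_map] at hx
      obtain ⟨y, hy, rfl⟩ := hx
      exact hdomA y hy s hs
    have hcardSkA : (Multiset.card SkA : Int) = k - kk := by omega
    have hlencons : ((e :: sk).length : Int) = (sk.length : Int) + 1 := by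
      push_cast [List.length_cons]; ring
    simp only [goA, goB, heapPush]
    by_cases hfight : e ≤ cur
    · rw [if_pos hfight]
      by_cases hev : k < ((e :: sk).length : Int)
      · -- fight, B evicts
        rw [if_pos hev]
        obtain ⟨hperm, hmin⟩ := heapPop_spec (e :: sk) (by simp)
        obtain ⟨hrle, hrdom⟩ := evict_dominance P sk e hskle hdomB hperm hmin
        set m := (heapPop (e :: sk)).1 with hmdef
        set r := (heapPop (e :: sk)).2 with hrdef
        have hsum_mr : e + sk.sum = m + r.sum := by
          have h := hperm.sum_eq; simpa using h
        have hlen_r : (r.length : Int) = (sk.length : Int) := by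
          have h := hperm.length_eq; simp at h; omega
        have hskk : (sk.length : Int) = k := by
          have h1 : (sk.length : Int) ≤ k := by rw [hlen]; exact min_le_right _ _
          omega
        have hcardP_ge : k ≤ (Multiset.card P : Int) := by
          have h3 : (sk.length : Int) ≤ (Multiset.card P : Int) := by
            rw [hlen]; exact min_le_left _ _
          omega
        have hrsum : (r : Multiset Int).sum = r.sum := Multiset.sum_coe r
        have hrcard : (Multiset.card (r : Multiset Int) : Int) = k := by
          rw [Multiset.coe_card]; omega
        have hskasum : SkA.sum ≤ (r : Multiset Int).sum := by
          refine dominant_ge (P + {e}) SkA (r : Multiset Int)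
            (le_trans hSkAleP (Multiset.le_add_right _ _)) hrle hPenn hrdom ?_
          have : (Multiset.card SkA : Int) ≤ (Multiset.card (r : Multiset Int) : Int) := by
            omega
          exact_mod_cast this
        have hcost1 : cost + m = (P + {e}).sum - (r : Multiset Int).sum := by
          rw [Multiset.sum_add, Multiset.sum_singleton, hrsum]
          linarith
        have hcost1_le : cost + m ≤ n := by
          have h5 : cost + m ≤ (P + {e}).sum - SkA.sum := by
            rw [hcost1]; linarith
          rw [Multiset.sum_add, Multiset.sum_singleton, hPsum] at h5
          linarith
        rw [if_neg (not_lt.mpr hcost1_le)]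
        refine ih (i + 1) res (-e :: hA) (cur - e) kk r (cost + m) SkA (P + {e})
          ?_ hrest' ?_ hSkA ?_ (by linarith) hkk hkk0 ?_ ?_ hrle ?_ ?_ hrdom hcost1_le
        · have hmapcons : (((-e :: hA).map (fun x => -x) : List Int) : Multiset Int)
              = e ::ₘ ((hA.map (fun x => -x) : List Int) : Multiset Int) := by simp
          rw [hmapcons, hP, ← Multiset.singleton_add]; abel
        · intro x hx
          rcases List.mem_cons.mp hx with rfl | hx
          · omega
          · exact hhA x hx
        · rw [List.sum_cons]; linarith
        · intro x hx s hs
          rcases List.mem_cons.mp hx with rfl | hx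
          · have := hcurS s hs; simp only [neg_neg]; linarith
          · exact hdomA x hx s hs
        · intro s hs; have := hcurS s hs; linarith
        · rw [hcost1, hrsum]
        · rw [hcardPe, min_eq_right (by linarith)]; omega
      · -- fight, B keeps
        rw [if_neg hev, if_neg (not_lt.mpr hcostn)]
        have hlt : (sk.length : Int) + 1 ≤ k := by
          have h := not_lt.mp hev; omega
        have hslP : (sk.length : Int) = (Multiset.card P : Int) := by
          rcases min_choice ((Multiset.card P : Int)) k with h | h
          · rw [hlen, h]
          · rw [h] at hlen; omega
        have hskP : (sk : Multiset Int) = P := by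
          apply Multiset.eq_of_le_of_card_le hskle
          have : (Multiset.card P : Int) ≤ (Multiset.card (sk : Multiset Int) : Int) := by
            rw [Multiset.coe_card]; omega
          exact_mod_cast this
        have heq : ((e :: sk : List Int) : Multiset Int) = P + {e} := by
          have h1 : ((e :: sk : List Int) : Multiset Int) = e ::ₘ (sk : Multiset Int) := by simp
          rw [h1, hskP, ← Multiset.singleton_add, add_comm]
        refine ih (i + 1) res (-e :: hA) (cur - e) kk (e :: sk) cost SkA (P + {e})
          ?_ hrest' ?_ hSkA ?_ (by linarith) hkk hkk0 ?_ ?_ (le_of_eq heq) ?_ ?_ ?_ hcostn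
        · have hmapcons : (((-e :: hA).map (fun x => -x) : List Int) : Multiset Int)
              = e ::ₘ ((hA.map (fun x => -x) : List Int) : Multiset Int) := by simp
          rw [hmapcons, hP, ← Multiset.singleton_add]; abel
        · intro x hx
          rcases List.mem_cons.mp hx with rfl | hx
          · omega
          · exact hhA x hx
        · rw [List.sum_cons]; linarith
        · intro x hx s hs
          rcases List.mem_cons.mp hx with rfl | hx
          · have := hcurS s hs; simp only [neg_neg]; linarith
          · exact hdomA x hx s hs
        · intro s hs; have := hcurS s hs; linarith
        · rw [Multiset.sum_add, Multiset.sum_singleton, List.sum_cons]; linarith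
        · rw [hcardPe, min_eq_left (by omega)]; omega
        · intro x hx u _
          rw [heq, tsub_self] at hx
          exact absurd hx (Multiset.notMem_zero x)
    · rw [if_neg hfight]
      have hclt : cur < e := not_le.mp hfight
      by_cases hkk_eq : kk = 0
      · -- A fails at i; show B fails at i too
        rw [if_pos hkk_eq]
        have hcardSkA_k : (Multiset.card SkA : Int) = k := by omega
        have hcardPk : k ≤ (Multiset.card P : Int) := by
          have h1 := Multiset.card_le_card hSkAleP
          have h2 : (Multiset.card SkA : Int) ≤ (Multiset.card P : Int) := by exact_mod_cast h1
          omega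
        have hskk : (sk.length : Int) = k := by rw [hlen, min_eq_right hcardPk]
        have hev : k < ((e :: sk).length : Int) := by omega
        rw [if_pos hev]
        obtain ⟨hperm, hmin⟩ := heapPop_spec (e :: sk) (by simp)
        obtain ⟨hrle, _⟩ := evict_dominance P sk e hskle hdomB hperm hmin
        set m := (heapPop (e :: sk)).1 with hmdef
        set r := (heapPop (e :: sk)).2 with hrdef
        have hsum_mr : e + sk.sum = m + r.sum := by
          have h := hperm.sum_eq; simpa using h
        have hlen_r : (r.length : Int) = (sk.length : Int) := by
          have h := hperm.length_eq; simp at h; omega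
        have hrsum : (r : Multiset Int).sum = r.sum := Multiset.sum_coe r
        have hrcard : (Multiset.card (r : Multiset Int) : Int) = k := by
          rw [Multiset.coe_card]; omega
        have hcost1 : cost + m = (P + {e}).sum - (r : Multiset Int).sum := by
          rw [Multiset.sum_add, Multiset.sum_singleton, hrsum]
          linarith
        have hdec : (r : Multiset Int) = ((r : Multiset Int) - P) + ((r : Multiset Int) ∩ P) :=
          (Multiset.sub_add_inter _ _).symm
        have hUB : (r : Multiset Int) - P ≤ ({e} : Multiset Int) := by
          rw [tsub_le_iff_right, add_comm]; exact hrle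
        have hbound : (r : Multiset Int).sum < SkA.sum + (e - cur) := by
          rcases Multiset.le_singleton.mp hUB with h0 | hsing
          · have hrleP : (r : Multiset Int) ≤ P := by
              conv_lhs => rw [hdec]
              rw [h0, zero_add]; exact Multiset.inter_le_right
            have h6 : (r : Multiset Int).sum ≤ SkA.sum := by
              refine dominant_ge P (r : Multiset Int) SkA hrleP hSkAleP hPnn hdomSkA ?_
              have : (Multiset.card (r : Multiset Int) : Int) ≤ (Multiset.card SkA : Int) := by
                omega
              exact_mod_cast this
            linarith
          · have hc1 : (Multiset.card ((r : Multiset Int) ∩ P) : Int) = k - 1 := by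
              have hd := congrArg Multiset.card hdec
              rw [Multiset.card_add, hsing, Multiset.card_singleton] at hd
              have : Multiset.card (r : Multiset Int)
                  = 1 + Multiset.card ((r : Multiset Int) ∩ P) := hd
              omega
            have hSkA_ne : SkA ≠ 0 := by
              apply Multiset.card_pos.mp
              have : (0:Int) < (Multiset.card SkA : Int) := by omega
              exact_mod_cast this
            obtain ⟨s0, hs0mem, hs0min⟩ := multiset_exists_min SkA hSkA_ne
            obtain ⟨S', hS'⟩ := Multiset.exists_cons_of_mem hs0mem
            have hS'card : (Multiset.card S' : Int) = k - 1 := by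
              have := congrArg Multiset.card hS'
              rw [Multiset.card_cons] at this
              omega
            have hdomS' : ∀ x ∈ P - S', ∀ s ∈ S', x ≤ s := by
              intro x hx s hs
              have hsSkA : s ∈ SkA := by rw [hS']; exact Multiset.mem_cons_of_mem hs
              have hPdec : P - S' = ((hA.map (fun x => -x) : List Int) : Multiset Int) + {s0} := by
                rw [hP, hS', show s0 ::ₘ S' = ({s0} : Multiset Int) + S' from
                  by rw [Multiset.singleton_add], ← add_assoc, add_tsub_cancel_right]
              rw [hPdec] at hx
              rcases Multiset.mem_add.mp hx with hx | hx
              · rw [Multiset.mem_coe, List.mem_map] at hx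
                obtain ⟨y, hy, rfl⟩ := hx
                exact hdomA y hy s hsSkA
              · rw [Multiset.mem_singleton] at hx; rw [hx]; exact hs0min s hsSkA
            have hS'le : S' ≤ P :=
              le_trans (by rw [hS']; exact Multiset.le_cons_self _ _) hSkAleP
            have hUAsum : ((r : Multiset Int) ∩ P).sum ≤ S'.sum := by
              refine dominant_ge P ((r : Multiset Int) ∩ P) S'
                (Multiset.inter_le_right) hS'le hPnn hdomS' ?_
              have : (Multiset.card ((r : Multiset Int) ∩ P) : Int)
                  ≤ (Multiset.card S' : Int) := by omega
              exact_mod_cast this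
            have hrsum_split : (r : Multiset Int).sum = e + ((r : Multiset Int) ∩ P).sum := by
              conv_lhs => rw [hdec]
              rw [Multiset.sum_add, hsing, Multiset.sum_singleton]
            have hS'sum : S'.sum = SkA.sum - s0 := by
              have := congrArg Multiset.sum hS'
              rw [Multiset.sum_cons] at this
              omega
            have hcurs0 := hcurS s0 hs0mem
            rw [hrsum_split]
            linarith
        have hfail : n < cost + m := by
          rw [hcost1, Multiset.sum_add, Multiset.sum_singleton, hPsum]
          linarith
        rw [if_pos hfail]
      · -- A skips
        rw [if_neg hkk_eq]
        obtain ⟨hpermA, hminA⟩ := heapPop_spec (-e :: hA) (by simp)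
        set q := heapPop (-e :: hA) with hqdef
        have hq1le : q.1 ≤ -e := hminA (-e) (by simp)
        have hcoA : ((-e :: hA : List Int) : Multiset Int) = q.1 ::ₘ (q.2 : Multiset Int) := by
          have h := Multiset.coe_eq_coe.mpr hpermA; simpa using h
        have hkey : e ::ₘ ((hA.map (fun x => -x) : List Int) : Multiset Int)
            = (-q.1) ::ₘ ((q.2.map (fun x => -x) : List Int) : Multiset Int) := by
          have h2 := congrArg (Multiset.map (fun x : Int => -x)) hcoA
          simpa using h2
        have hsumA : q.2.sum = -e + hA.sum - q.1 := by
          have h := hpermA.sum_eq; simp at h; linarith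
        have hq2mem : ∀ x ∈ q.2, x = -e ∨ x ∈ hA := by
          intro x hx
          have h : x ∈ -e :: hA := hpermA.mem_iff.mpr (List.mem_cons_of_mem _ hx)
          simpa using h
        have hq2sub : ∀ x ∈ q.2, q.1 ≤ x :=
          fun x hx => hminA x (hpermA.mem_iff.mpr (List.mem_cons_of_mem _ hx))
        have hP' : P + {e} = ((q.2.map (fun x => -x) : List Int) : Multiset Int)
            + ((-q.1) ::ₘ SkA) := by
          have h3 : ((q.2.map (fun x => -x) : List Int) : Multiset Int) + ((-q.1) ::ₘ SkA)
              = ((-q.1) ::ₘ ((q.2.map (fun x => -x) : List Int) : Multiset Int)) + SkA := by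
            simp only [← Multiset.singleton_add]; abel
          rw [h3, ← hkey, hP]
          simp only [← Multiset.singleton_add]; abel
        have hhA2 : ∀ x ∈ q.2, x ≤ 0 := by
          intro x hx
          rcases hq2mem x hx with rfl | hx
          · omega
          · exact hhA x hx
        have hSkA'nn : ∀ s ∈ (-q.1) ::ₘ SkA, (0:Int) ≤ s := by
          intro s hs
          rcases Multiset.mem_cons.mp hs with rfl | hs
          · linarith
          · exact hSkA s hs
        have hcur0' : (0:Int) ≤ cur - e + q.1 * (-1) := by linarith
        have hcurA' : cur - e + q.1 * (-1) = n + q.2.sum := by linarith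
        have hkkA' : kk - 1 = k - Multiset.card ((-q.1) ::ₘ SkA) := by
          rw [Multiset.card_cons]; push_cast; omega
        have hdomA' : ∀ x ∈ q.2, ∀ s ∈ (-q.1) ::ₘ SkA, -x ≤ s := by
          intro x hx s hs
          have hq1x := hq2sub x hx
          rcases Multiset.mem_cons.mp hs with rfl | hsS
          · linarith
          · by_cases hq1A : q.1 ∈ hA
            · have h4 := hdomA q.1 hq1A s hsS
              rcases hq2mem x hx with rfl | hxA
              · simp only [neg_neg]; linarith
              · exact hdomA x hxA s hsS
            · have hq1e : q.1 = -e := by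
                have h5 : q.1 ∈ -e :: hA := hpermA.mem_iff.mpr (by simp)
                rcases List.mem_cons.mp h5 with h | h
                · exact h
                · exact absurd h hq1A
              have hq2hA : (q.2 : Multiset Int) = (hA : Multiset Int) := by
                rw [hq1e] at hcoA
                have h6 : (-e) ::ₘ (hA : Multiset Int) = (-e) ::ₘ (q.2 : Multiset Int) := by
                  simpa using hcoA
                exact ((Multiset.cons_inj_right _).mp h6).symm
              have hxA : x ∈ hA := by
                rw [← Multiset.mem_coe, ← hq2hA, Multiset.mem_coe]; exact hx
              exact hdomA x hxA s hsS
        have hcurS' : ∀ s ∈ (-q.1) ::ₘ SkA, cur - e + q.1 * (-1) < s := by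
          intro s hs
          rcases Multiset.mem_cons.mp hs with rfl | hsS
          · linarith
          · by_cases hq1A : q.1 ∈ hA
            · have h4 := hdomA q.1 hq1A s hsS
              linarith
            · have hq1e : q.1 = -e := by
                have h5 : q.1 ∈ -e :: hA := hpermA.mem_iff.mpr (by simp)
                rcases List.mem_cons.mp h5 with h | h
                · exact h
                · exact absurd h hq1A
              have := hcurS s hsS
              rw [hq1e]; linarith
        by_cases hev : k < ((e :: sk).length : Int)
        · -- skip, B evicts
          rw [if_pos hev]
          obtain ⟨hperm, hmin⟩ := heapPop_spec (e :: sk) (by simp)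
          obtain ⟨hrle, hrdom⟩ := evict_dominance P sk e hskle hdomB hperm hmin
          set m := (heapPop (e :: sk)).1 with hmdef
          set r := (heapPop (e :: sk)).2 with hrdef
          have hsum_mr : e + sk.sum = m + r.sum := by
            have h := hperm.sum_eq; simpa using h
          have hlen_r : (r.length : Int) = (sk.length : Int) := by
            have h := hperm.length_eq; simp at h; omega
          have hskk : (sk.length : Int) = k := by
            have h1 : (sk.length : Int) ≤ k := by rw [hlen]; exact min_le_right _ _
            omega
          have hcardP_ge : k ≤ (Multiset.card P : Int) := by
            have h3 : (sk.length : Int) ≤ (Multiset.card P : Int) := by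
              rw [hlen]; exact min_le_left _ _
            omega
          have hrsum : (r : Multiset Int).sum = r.sum := Multiset.sum_coe r
          have hrcard : (Multiset.card (r : Multiset Int) : Int) = k := by
            rw [Multiset.coe_card]; omega
          have hcost1 : cost + m = (P + {e}).sum - (r : Multiset Int).sum := by
            rw [Multiset.sum_add, Multiset.sum_singleton, hrsum]
            linarith
          have hskasum : ((-q.1) ::ₘ SkA).sum ≤ (r : Multiset Int).sum := by
            refine dominant_ge (P + {e}) ((-q.1) ::ₘ SkA) (r : Multiset Int)
              ?_ hrle hPenn hrdom ?_
            · rw [hP']; exact Multiset.le_add_left _ _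
            · have : (Multiset.card ((-q.1) ::ₘ SkA) : Int)
                  ≤ (Multiset.card (r : Multiset Int) : Int) := by
                rw [Multiset.card_cons]; push_cast; omega
              exact_mod_cast this
          have hcost1_le : cost + m ≤ n := by
            have h7 : ((-q.1) ::ₘ SkA).sum = -q.1 + SkA.sum := by
              rw [Multiset.sum_cons]
            have h8 : cost + m ≤ (P + {e}).sum - ((-q.1) ::ₘ SkA).sum := by
              rw [hcost1]; linarith
            rw [Multiset.sum_add, Multiset.sum_singleton, hPsum, h7] at h8
            linarith
          rw [if_neg (not_lt.mpr hcost1_le)]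
          refine ih (i + 1) res q.2 (cur - e + q.1 * (-1)) (kk - 1) r (cost + m)
            ((-q.1) ::ₘ SkA) (P + {e})
            hP' hrest' hhA2 hSkA'nn hcurA' hcur0' hkkA' (by omega) hdomA' hcurS'
            hrle ?_ ?_ hrdom hcost1_le
          · rw [hcost1, hrsum]
          · rw [hcardPe, min_eq_right (by linarith)]; omega
        · -- skip, B keeps
          rw [if_neg hev, if_neg (not_lt.mpr hcostn)]
          have hlt : (sk.length : Int) + 1 ≤ k := by
            have h := not_lt.mp hev; omega
          have hslP : (sk.length : Int) = (Multiset.card P : Int) := by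
            rcases min_choice ((Multiset.card P : Int)) k with h | h
            · rw [hlen, h]
            · rw [h] at hlen; omega
          have hskP : (sk : Multiset Int) = P := by
            apply Multiset.eq_of_le_of_card_le hskle
            have : (Multiset.card P : Int) ≤ (Multiset.card (sk : Multiset Int) : Int) := by
              rw [Multiset.coe_card]; omega
            exact_mod_cast this
          have heq : ((e :: sk : List Int) : Multiset Int) = P + {e} := by
            have h1 : ((e :: sk : List Int) : Multiset Int) = e ::ₘ (sk : Multiset Int) := by simp
            rw [h1, hskP, ← Multiset.singleton_add, add_comm]
          refine ih (i + 1) res q.2 (cur - e + q.1 * (-1)) (kk - 1) (e :: sk) cost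
            ((-q.1) ::ₘ SkA) (P + {e})
            hP' hrest' hhA2 hSkA'nn hcurA' hcur0' hkkA' (by omega) hdomA' hcurS'
            (le_of_eq heq) ?_ ?_ ?_ hcostn
          · rw [Multiset.sum_add, Multiset.sum_singleton, List.sum_cons]; linarith
          · rw [hcardPe, min_eq_left (by omega)]; omega
          · intro x hx u _
            rw [heq, tsub_self] at hx
            exact absurd hx (Multiset.notMem_zero x)

-- ===== VERDICT (by name: the statement is the Claim_ definition above) =====
theorem solution_spec : Claim_equal_solution := by
  intro n k enemy _hDom hPre
  unfold Spec_solution solution solution_alt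
  by_cases hg : (enemy.length : Int) ≤ k
  · simp [hg]
  · obtain ⟨hn, hk, he⟩ := hPre.resolve_left hg
    simp only [hg, if_false]
    exact main_bisim n k enemy 0 (enemy.length : Int) [] n k [] 0 0 0
      (by simp) he (by simp) (by simp) (by simp) hn (by simp) hk (by simp) (by simp)
      (by simp) (by simp) (by simp [hk]) (by simp) hn
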